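-- pv_equiv track=rewrite | github.com/WillithG/Blackjack_RL_Comparison_Tool | Code/DB/DB_Wrapper.py | sanitize_query
-- ===== SOURCE A (Python) =====
-- def sanitize_query(query):
--     key_words = ["INSERT", "UPDATE", "DROP", "SELECT"]
--     for kw in key_words:
--         if kw in query:
--             return False
--     for char in query:
--         ascii_char = ord(char)
--         if not ((ascii_char >= 65 and ascii_char <= 90) or  # capital letters
--                 (ascii_char >= 97 and ascii_char <= 122) or  # lower case
--                 (ascii_char >= 48 and ascii_char <= 57) or  # numbers
--                 (char == "_")):  # allow underscores
--             return False
--     return True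
-- ===== SOURCE B (Python) =====
-- _KEYWORDS = ("INSERT", "UPDATE", "DROP", "SELECT")
--
-- def sanitize_query(query):
--     # Single pass over positions: at each index reject a bad character or a
--     # forbidden keyword starting there (startswith with a tuple and an offset),
--     # instead of A's two staged loops (global substring search, then ord ranges).
--     for i, c in enumerate(query):
--         if not (c == "_" or (c.isascii() and c.isalnum())):
--             return False
--         if query.startswith(_KEYWORDS, i):
--             return False
--     return True
-- ===== Notes on version B (the rewrite author's own statement) =====
-- stated objective: idiomatic
-- what changed: Replaces A's two staged loops (a global substring search per keyword, then a per-character ord-range loop) by a single pass over enumerate(query) that rejects a disallowed character (via '_'/isascii/isalnum) or a keyword starting at the current index (startswith with a tuple and an offset).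
import Mathlib
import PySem

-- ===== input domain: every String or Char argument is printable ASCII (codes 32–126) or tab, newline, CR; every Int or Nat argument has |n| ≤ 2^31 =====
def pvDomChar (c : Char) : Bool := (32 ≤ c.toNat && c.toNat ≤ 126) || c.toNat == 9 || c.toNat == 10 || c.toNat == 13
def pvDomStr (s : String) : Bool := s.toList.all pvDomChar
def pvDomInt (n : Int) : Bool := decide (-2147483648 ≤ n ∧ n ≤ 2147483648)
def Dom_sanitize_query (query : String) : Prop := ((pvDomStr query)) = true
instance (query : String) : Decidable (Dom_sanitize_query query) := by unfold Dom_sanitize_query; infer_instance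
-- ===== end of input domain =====

-- B replaces A's two staged loops (per-keyword global substring search, then a per-character
-- ord-range loop) by one pass over enumerate(query), rejecting at each index a bad
-- character or a keyword starting there (idiomatic single-pass scan; same cost).


-- ===== PORT A =====
-- first loop of A: return False as soon as a keyword is contained in the query
def pvKwLoopA : List String → String → Bool
  | [], _ => true
  | kw :: rest, q => if PySem.Str.isIn kw q then false else pvKwLoopA rest q

-- A's per-character test, exactly the ord-range disjunction
def pvCharOkA (c : Char) : Bool :=
  (65 ≤ c.toNat && c.toNat ≤ 90) || (97 ≤ c.toNat && c.toNat ≤ 122) ||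
    (48 ≤ c.toNat && c.toNat ≤ 57) || (c == '_')

-- second loop of A: return False on the first disallowed character
def pvCharLoopA : List Char → Bool
  | [] => true
  | c :: cs => if !(pvCharOkA c) then false else pvCharLoopA cs

def sanitize_query (query : String) : Bool :=
  if pvKwLoopA ["INSERT", "UPDATE", "DROP", "SELECT"] query then pvCharLoopA query.toList
  else false

-- ===== PORT B =====
def pvKeywords : List (List Char) :=
  ["INSERT".toList, "UPDATE".toList, "DROP".toList, "SELECT".toList]

-- B's per-character test: c == "_" or (c.isascii() and c.isalnum())
-- (isascii ported by hand as codepoint < 128, exact: that is Python's str.isascii)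
def pvCharOkB (c : Char) : Bool :=
  c == '_' || (decide (c.toNat < 128) && PySem.Chars.isalnum c)

-- B's for loop over enumerate(query); query.startswith(_KEYWORDS, i) with a tuple and a
-- start offset = some keyword is a prefix of query[i:] (i is a nonnegative enumerate index,
-- so .toNat is exact here)
def pvLoopB (ql : List Char) : List (Int × Char) → Bool
  | [] => true
  | (i, c) :: rest =>
    if !(pvCharOkB c) then false
    else if pvKeywords.any (fun kw => PySem.Chars.startswith (ql.drop i.toNat) kw) then false
    else pvLoopB ql rest

def sanitize_query_alt (query : String) : Bool :=
  pvLoopB query.toList (PySem.List.enumerate query.toList)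

-- ===== PRECONDITION & SPEC =====
def Spec_sanitize_query (query : String) (out : Bool) : Prop := out = sanitize_query_alt query
instance (query : String) (out : Bool) : Decidable (Spec_sanitize_query query out) := by unfold Spec_sanitize_query; infer_instance

-- ===== CLAIM =====
def Claim_equal_sanitize_query : Prop := ∀ (query : String), Dom_sanitize_query query → Spec_sanitize_query query (sanitize_query query)

-- ===== LEMMAS AND PROOFS =====

-- A's early-return keyword loop is true iff no keyword of the list is an infix of the query
theorem pvKwLoopA_iff (l : List String) (q : String) :
    pvKwLoopA l q = true ↔ ∀ kw ∈ l, ¬ kw.toList <:+: q.toList := by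
  induction l with
  | nil => simp [pvKwLoopA]
  | cons kw rest ih =>
    simp only [pvKwLoopA, List.mem_cons]
    split_ifs with h
    · simp only [false_iff, not_forall]
      exact ⟨kw, Or.inl rfl, by simpa using (PySem.Str.isIn_iff_infix kw q).mp h⟩
    · rw [Bool.not_eq_true] at h
      rw [ih]
      constructor
      · rintro hall k (rfl | hk)
        · exact (PySem.Chars.isIn_eq_false_iff _ _).mp h
        · exact hall k hk
      · intro hall k hk; exact hall k (Or.inr hk)

-- A's character loop is `all` of its per-character test
theorem pvCharLoopA_eq_all (cs : List Char) : pvCharLoopA cs = cs.all pvCharOkA := by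
  induction cs with
  | nil => rfl
  | cons c cs ih =>
    simp only [pvCharLoopA, List.all_cons, ih]
    split_ifs with h <;> simp_all

-- A's ord-range test and B's '_' / isascii / isalnum test agree on every character
theorem pvCharOk_eq (c : Char) : pvCharOkA c = pvCharOkB c := by
  by_cases hu : c = '_'
  · subst hu; decide
  · have hne : (c == '_') = false := beq_eq_false_iff_ne.mpr hu
    simp only [pvCharOkA, pvCharOkB, PySem.Chars.isalnum, PySem.Chars.isalpha,
      PySem.Chars.isdigit, PySem.Chars.isupper, PySem.Chars.islower, hne,
      Bool.or_false, Bool.false_or]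
    have h1 : ('A' ≤ c) ↔ 65 ≤ c.toNat := by rw [Char.le_def]; exact UInt32.le_iff_toNat_le ..
    have h2 : (c ≤ 'Z') ↔ c.toNat ≤ 90 := by rw [Char.le_def]; exact UInt32.le_iff_toNat_le ..
    have h3 : ('a' ≤ c) ↔ 97 ≤ c.toNat := by rw [Char.le_def]; exact UInt32.le_iff_toNat_le ..
    have h4 : (c ≤ 'z') ↔ c.toNat ≤ 122 := by rw [Char.le_def]; exact UInt32.le_iff_toNat_le ..
    have h5 : ('0' ≤ c) ↔ 48 ≤ c.toNat := by rw [Char.le_def]; exact UInt32.le_iff_toNat_le ..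
    have h6 : (c ≤ '9') ↔ c.toNat ≤ 57 := by rw [Char.le_def]; exact UInt32.le_iff_toNat_le ..
    rw [Bool.eq_iff_iff]
    simp only [Bool.or_eq_true, Bool.and_eq_true, decide_eq_true_eq, h1, h2, h3, h4, h5, h6]
    omega

-- the four keywords are nonempty
theorem pvKeywords_ne_nil : ∀ kw ∈ pvKeywords, kw ≠ [] := by decide

-- B's loop is true iff every listed char passes B's test and no keyword starts at any listed index
theorem pvLoopB_iff (ql : List Char) (ps : List (Int × Char)) :
    pvLoopB ql ps = true ↔
      (∀ p ∈ ps, pvCharOkB p.2 = true) ∧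
        ∀ p ∈ ps, ∀ kw ∈ pvKeywords, ¬ kw <+: ql.drop p.1.toNat := by
  induction ps with
  | nil => simp [pvLoopB]
  | cons p rest ih =>
    obtain ⟨i, c⟩ := p
    simp only [pvLoopB]
    split_ifs with h1 h2
    · simp only [false_iff, not_and]
      intro hall
      have := hall (i, c) (List.mem_cons_self ..)
      simp_all
    · simp only [false_iff, not_and]
      intro _
      rw [List.any_eq_true] at h2
      obtain ⟨kw, hkw, hsw⟩ := h2
      intro hall
      exact hall (i, c) (List.mem_cons_self ..) kw hkw
        ((PySem.Chars.startswith_iff _ _).mp hsw)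
    · have h1' : pvCharOkB c = true := by simpa using h1
      rw [Bool.not_eq_true, List.any_eq_false] at h2
      rw [ih]
      constructor
      · rintro ⟨hc, hpos⟩
        refine ⟨?_, ?_⟩
        · intro x hx
          rcases List.mem_cons.mp hx with rfl | hx
          · exact h1'
          · exact hc x hx
        · intro x hx kw hkw
          rcases List.mem_cons.mp hx with rfl | hx
          · exact fun hpre => (h2 kw hkw) ((PySem.Chars.startswith_iff _ _).mpr hpre)
          · exact hpos x hx kw hkw
      · rintro ⟨hc, hpos⟩
        exact ⟨fun x hx => hc x (List.mem_cons_of_mem _ hx),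
          fun x hx => hpos x (List.mem_cons_of_mem _ hx)⟩

-- ===== VERDICT =====
theorem sanitize_query_spec : Claim_equal_sanitize_query := by
  intro q _
  unfold Spec_sanitize_query sanitize_query sanitize_query_alt
  rw [Bool.eq_iff_iff, pvLoopB_iff]
  constructor
  · intro h
    split_ifs at h with hkw
    · rw [pvCharLoopA_eq_all, List.all_eq_true] at h
      have hno := (pvKwLoopA_iff _ _).mp hkw
      refine ⟨?_, ?_⟩
      · intro p hp
        obtain ⟨k, hk, rfl⟩ := (PySem.List.mem_enumerate_iff ..).mp hp
        exact (pvCharOk_eq _).symm.trans (h _ (List.getElem_mem hk))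
      · intro p hp kw hkw' hpre
        have hinf : kw <:+: q.toList := hpre.isInfix.trans (List.drop_suffix _ _).isInfix
        simp only [pvKeywords, List.mem_cons, List.not_mem_nil, or_false] at hkw'
        rcases hkw' with rfl | rfl | rfl | rfl
        · exact hno "INSERT" (by simp) hinf
        · exact hno "UPDATE" (by simp) hinf
        · exact hno "DROP" (by simp) hinf
        · exact hno "SELECT" (by simp) hinf
  · rintro ⟨hc, hpos⟩
    have hkw : pvKwLoopA ["INSERT", "UPDATE", "DROP", "SELECT"] q = true := by
      rw [pvKwLoopA_iff]
      intro kw hkwmem hinf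
      have hin : PySem.Chars.isIn kw.toList q.toList = true :=
        (PySem.Chars.isIn_iff_infix _ _).mpr hinf
      obtain ⟨j, hpre⟩ := (PySem.Chars.exists_prefix_drop_iff_isIn _ _).mpr hin
      have hmem : kw.toList ∈ pvKeywords := by
        fin_cases hkwmem <;> simp [pvKeywords]
      by_cases hj : j < q.toList.length
      · have hp : ((j : Int), q.toList[j]) ∈ PySem.List.enumerate q.toList :=
          (PySem.List.mem_enumerate_iff ..).mpr ⟨j, hj, by simp⟩
        exact hpos _ hp _ hmem (by simpa using hpre)
      · rw [List.drop_eq_nil_of_le (by omega)] at hpre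
        exact pvKeywords_ne_nil _ hmem (List.prefix_nil.mp hpre)
    rw [hkw, if_pos rfl, pvCharLoopA_eq_all, List.all_eq_true]
    intro c hcq
    obtain ⟨k, hk, rfl⟩ := List.mem_iff_getElem.mp hcq
    have hp : ((k : Int), q.toList[k]) ∈ PySem.List.enumerate q.toList :=
      (PySem.List.mem_enumerate_iff ..).mpr ⟨k, hk, by simp⟩
    exact (pvCharOk_eq _).trans (hc _ hp)
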